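-- pv_equiv track=rewrite | github.com/seanreconnery/SteganArticle | main.py | GrabTheDigits
-- ===== SOURCE A (Python) =====
-- def GrabTheDigits(theText, theMsg):
--     # return a list of integers that correspond to letter locations in the string.
--     # currently searches from the end of the string (more obfuscated than searching from the start.. but not much)
--     # TO-DO:  iterate thru the string to find the next instance of the needed letter
--     decrypt_string = []
--     ds = ''
--     counter = 0             # counter to help iterate thru letters so each letter doesn't always have to be the same number
--     for ltrs in theMsg:
--         if theText.find(ltrs, counter) != -1:
--             # letter found
--             ds += str(theText.find(ltrs, counter)) + ','
--             decrypt_string.append(str(theText.find(ltrs, counter)))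
--             counter +=1
--         else:
--             # letter NOT found.  start counter over
--             counter = 0
--
--     #return decrypt_string      # returns list
--     return ds[0:(len(ds) - 1)]  # returns a csv string
-- ===== SOURCE B (Python) =====
-- def GrabTheDigits(theText, theMsg):
--     # Precompute, in one pass over theText, the sorted list of positions of
--     # each character; then answer each letter of theMsg by binary-searching its
--     # position list for the first index >= counter, rather than re-scanning
--     # theText with str.find for every letter.
--     pos = {}
--     for i, ch in enumerate(theText):
--         pos.setdefault(ch, []).append(i)
--     out = []
--     counter = 0
--     for c in theMsg:
--         ps = pos.get(c, [])
--         lo, hi = 0, len(ps)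
--         while lo < hi:
--             mid = (lo + hi) // 2
--             if ps[mid] < counter:
--                 lo = mid + 1
--             else:
--                 hi = mid
--         if lo < len(ps):
--             out.append(str(ps[lo]))
--             counter += 1
--         else:
--             counter = 0
--     return ','.join(out)
-- ===== Notes on version B (the rewrite author's own statement) =====
-- stated objective: alternative
-- what changed: B builds a per-character sorted position index of theText in one pass and answers each message letter with a hand-written bisect_left binary search for the first position >= counter, instead of A's three redundant str.find scans of theText per letter.
import Mathlib
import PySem

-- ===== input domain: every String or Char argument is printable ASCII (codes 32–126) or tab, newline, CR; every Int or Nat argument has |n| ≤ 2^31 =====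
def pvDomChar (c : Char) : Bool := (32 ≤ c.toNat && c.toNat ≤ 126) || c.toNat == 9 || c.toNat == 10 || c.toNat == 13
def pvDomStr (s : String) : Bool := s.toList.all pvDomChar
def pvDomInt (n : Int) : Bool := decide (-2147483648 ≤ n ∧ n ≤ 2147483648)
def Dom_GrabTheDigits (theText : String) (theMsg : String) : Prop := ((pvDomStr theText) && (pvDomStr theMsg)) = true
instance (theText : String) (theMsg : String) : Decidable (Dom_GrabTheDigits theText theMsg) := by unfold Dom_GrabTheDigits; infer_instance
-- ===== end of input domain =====

-- B replaces A's repeated str.find scans with a one-pass per-character position index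
-- plus a binary search per message letter; same return value everywhere.

-- ===== PORT A =====
-- loop state: (decrypt_string, ds, counter) exactly as in A's loop
def GrabTheDigits (theText : String) (theMsg : String) : String :=
  let st := theMsg.toList.foldl
    (fun (st : List String × List Char × Int) ltrs =>
      if PySem.Chars.findFrom theText.toList [ltrs] st.2.2 ≠ -1 then
        (st.1 ++ [PySem.Int.toStr (PySem.Chars.findFrom theText.toList [ltrs] st.2.2)],
         st.2.1 ++ PySem.Int.toChars (PySem.Chars.findFrom theText.toList [ltrs] st.2.2) ++ [','],
         st.2.2 + 1)
      else (st.1, st.2.1, 0))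
    ([], [], 0)
  String.ofList (PySem.List.slice st.2.1 (some 0) (some ((st.2.1.length : Int) - 1)))

-- ===== PORT B =====
-- the hand-written bisect_left while-loop of Source B (lo/hi/mid)
def pvBsLoop (ps : List Int) (counter : Int) (fuel : Nat) (lo hi : Nat) : Nat :=
  match fuel with
  | 0 => lo
  | fuel + 1 =>
    if lo < hi then
      let mid := (lo + hi) / 2
      if ps.getD mid 0 < counter then pvBsLoop ps counter fuel (mid + 1) hi
      else pvBsLoop ps counter fuel lo mid
    else lo

def GrabTheDigits_alt (theText : String) (theMsg : String) : String :=
  let pos := (PySem.List.enumerate theText.toList 0).foldl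
    (fun (d : PySem.Dict Char (List Int)) p => d.insert p.2 (d.getD p.2 [] ++ [p.1]))
    PySem.Dict.empty
  let st := theMsg.toList.foldl
    (fun (st : List String × Int) c =>
      let ps := pos.getD c []
      let lo := pvBsLoop ps st.2 ps.length 0 ps.length
      if lo < ps.length then (st.1 ++ [PySem.Int.toStr (ps.getD lo 0)], st.2 + 1)
      else (st.1, 0))
    ([], 0)
  PySem.Str.join "," st.1

-- ===== PRECONDITION & SPEC =====
def Spec_GrabTheDigits (theText : String) (theMsg : String) (out : String) : Prop := out = GrabTheDigits_alt theText theMsg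
instance (theText : String) (theMsg : String) (out : String) : Decidable (Spec_GrabTheDigits theText theMsg out) := by unfold Spec_GrabTheDigits; infer_instance

-- ===== CLAIM (what is proved, stated in full; the proofs are below) =====
def Claim_equal_GrabTheDigits : Prop := ∀ (theText : String) (theMsg : String), Dom_GrabTheDigits theText theMsg → Spec_GrabTheDigits theText theMsg (GrabTheDigits theText theMsg)

-- ===== LEMMAS AND PROOFS =====
def pvPosFrom (l : List Char) (c : Char) (s : Int) : List Int :=
  match l with
  | [] => []
  | x :: xs => if x = c then s :: pvPosFrom xs c (s + 1) else pvPosFrom xs c (s + 1)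

theorem pvMem_posFrom {l : List Char} {c : Char} {s x : Int} :
    x ∈ pvPosFrom l c s ↔ ∃ j : Nat, x = s + j ∧ l[j]? = some c := by
  induction l generalizing s with
  | nil => simp [pvPosFrom]
  | cons a xs ih =>
    simp only [pvPosFrom]
    constructor
    · intro hx
      split at hx
      · rcases List.mem_cons.1 hx with h | h
        · exact ⟨0, by simpa using h, by simp_all⟩
        · rcases ih.1 h with ⟨j, hj1, hj2⟩
          exact ⟨j + 1, by omega, by simpa using hj2⟩
      · rcases ih.1 hx with ⟨j, hj1, hj2⟩
        exact ⟨j + 1, by omega, by simpa using hj2⟩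
    · rintro ⟨j, hj1, hj2⟩
      cases j with
      | zero =>
        simp at hj2
        subst hj2
        simp [hj1]
      | succ j =>
        have : x ∈ pvPosFrom xs c (s + 1) := ih.2 ⟨j, by omega, by simpa using hj2⟩
        split <;> simp [this]

theorem pvPosFrom_ge {l : List Char} {c : Char} {s x : Int} (h : x ∈ pvPosFrom l c s) : s ≤ x := by
  rcases pvMem_posFrom.1 h with ⟨j, hj, -⟩; omega

theorem pvPosFrom_sorted (l : List Char) (c : Char) (s : Int) :
    (pvPosFrom l c s).Pairwise (· < ·) := by
  induction l generalizing s with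
  | nil => simp [pvPosFrom]
  | cons a xs ih =>
    simp only [pvPosFrom]
    split
    · exact List.Pairwise.cons (fun x hx => by have := pvPosFrom_ge hx; omega) (ih _)
    · exact ih _

theorem pvDict_getD (l : List Char) (c : Char) : ∀ (s : Int) (d : PySem.Dict Char (List Int)),
    ((PySem.List.enumerate l s).foldl
      (fun (d : PySem.Dict Char (List Int)) p => d.insert p.2 (d.getD p.2 [] ++ [p.1])) d).getD c []
    = d.getD c [] ++ pvPosFrom l c s := by
  induction l with
  | nil => intro s d; simp [pvPosFrom, PySem.List.enumerate]
  | cons a xs ih =>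
    intro s d
    rw [PySem.List.enumerate_cons]
    simp only [List.foldl_cons, ih]
    rw [PySem.Dict.getD_insert]
    simp only [pvPosFrom]
    by_cases hc : c = a
    · subst hc; simp
    · simp [eq_comm, hc]

theorem pvSingle_prefix {c : Char} {l : List Char} : [c] <+: l ↔ l.head? = some c := by
  cases l with
  | nil => simp
  | cons a xs => simp [List.cons_prefix_cons, eq_comm]

theorem pvFlatten_comma (p : List Char) (rest : List (List Char)) :
    ((p :: rest).map (· ++ [','])).flatten = [','].intercalate (p :: rest) ++ [','] := by
  induction rest generalizing p with
  | nil => simp [List.intercalate]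
  | cons q rs ih =>
    have hrw : [','].intercalate (p :: q :: rs) = p ++ [','] ++ [','].intercalate (q :: rs) := by
      simp [List.intercalate]
    simp only [List.map_cons, List.flatten_cons] at ih ⊢
    rw [hrw, ih q]
    simp [List.intercalate]

theorem pvDropLast_flatten (parts : List (List Char)) :
    (parts.map (· ++ [','])).flatten.dropLast = [','].intercalate parts := by
  cases parts with
  | nil => simp [List.intercalate]
  | cons p rest => rw [pvFlatten_comma]; simp
theorem pvBsLoop_spec (ps : List Int) (k : Int) (hs : ps.Pairwise (· ≤ ·)) :
    ∀ fuel lo hi, hi - lo ≤ fuel → lo ≤ hi → hi ≤ ps.length →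
    (∀ j (_ : j < ps.length), j < lo → ps[j] < k) →
    (∀ j (_ : j < ps.length), hi ≤ j → k ≤ ps[j]) →
    lo ≤ pvBsLoop ps k fuel lo hi ∧ pvBsLoop ps k fuel lo hi ≤ hi ∧
    (∀ j (_ : j < ps.length), j < pvBsLoop ps k fuel lo hi → ps[j] < k) ∧
    (∀ j (_ : j < ps.length), pvBsLoop ps k fuel lo hi ≤ j → k ≤ ps[j]) := by
  have hmono : ∀ i j (_ : i < ps.length) (_ : j < ps.length), i ≤ j → ps[i] ≤ ps[j] := by
    intro i j hi hj hij
    rcases eq_or_lt_of_le hij with rfl | h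
    · exact le_refl _
    · exact List.pairwise_iff_getElem.1 hs i j hi hj h
  intro fuel
  induction fuel with
  | zero =>
    intro lo hi h1 h2 h3 hlo hhi
    have heq0 : lo = hi := by omega
    subst heq0
    rw [pvBsLoop]
    exact ⟨le_refl _, le_refl _, hlo, hhi⟩
  | succ n ih =>
    intro lo hi h1 h2 h3 hlo hhi
    rw [pvBsLoop]
    by_cases h : lo < hi
    · rw [if_pos h]
      have hmidlt : (lo + hi) / 2 < ps.length := by omega
      have hgetD : ps.getD ((lo + hi) / 2) 0 = ps[(lo + hi) / 2] := List.getD_eq_getElem ps 0 hmidlt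
      simp only [hgetD]
      by_cases hcmp : ps[(lo + hi) / 2] < k
      · rw [if_pos hcmp]
        exact (ih ((lo + hi) / 2 + 1) hi (by omega) (by omega) h3
          (fun j hj hjlt => lt_of_le_of_lt (hmono j ((lo+hi)/2) hj hmidlt (by omega)) hcmp)
          hhi).imp (fun h' => by omega) id
      · rw [if_neg hcmp]
        refine (ih lo ((lo + hi) / 2) (by omega) (by omega) (by omega) hlo
          (fun j hj hjge => le_trans (not_lt.1 hcmp) (hmono ((lo+hi)/2) j hmidlt hj hjge))).imp
          id (fun h' => ⟨by omega, h'.2⟩)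
    · rw [if_neg h]
      have heq : lo = hi := by omega
      subst heq
      exact ⟨le_refl _, le_refl _, hlo, hhi⟩

theorem pvFindFrom_big (t : List Char) (sub : List Char) (k : Int) (h0 : 0 ≤ k)
    (hbig : (t.length : Int) < k) : PySem.Chars.findFrom t sub k none = -1 := by
  simp only [PySem.Chars.findFrom]
  split_ifs <;> omega
theorem pvMem_pos0 {t : List Char} {c : Char} {x : Int} :
    x ∈ pvPosFrom t c 0 ↔ ∃ j : Nat, x = (j : Int) ∧ t[j]? = some c := by
  simp [pvMem_posFrom]

theorem pvStep_eq (t : List Char) (c : Char) (k : Int) (hk : 0 ≤ k) :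
    (PySem.Chars.findFrom t [c] k = -1 ↔ ¬ pvBsLoop (pvPosFrom t c 0) k (pvPosFrom t c 0).length 0 (pvPosFrom t c 0).length < (pvPosFrom t c 0).length) ∧
    (pvBsLoop (pvPosFrom t c 0) k (pvPosFrom t c 0).length 0 (pvPosFrom t c 0).length < (pvPosFrom t c 0).length →
      PySem.Chars.findFrom t [c] k = (pvPosFrom t c 0).getD (pvBsLoop (pvPosFrom t c 0) k (pvPosFrom t c 0).length 0 (pvPosFrom t c 0).length) 0) := by
  set ps := pvPosFrom t c 0 with hps
  have hsorted : ps.Pairwise (· < ·) := pvPosFrom_sorted t c 0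
  have hs : ps.Pairwise (· ≤ ·) := hsorted.imp le_of_lt
  obtain ⟨-, hr2, hlt, hge⟩ := pvBsLoop_spec ps k hs ps.length 0 ps.length (by omega) (by omega) (le_refl _)
    (by omega) (fun j hj hge => by omega)
  set r := pvBsLoop ps k ps.length 0 ps.length with hrdef
  -- elements of ps are < t.length
  have helt : ∀ x ∈ ps, (0:Int) ≤ x ∧ x < t.length := by
    intro x hx
    rcases pvMem_pos0.1 hx with ⟨j, rfl, hj⟩
    have : j < t.length := by
      by_contra hle
      rw [List.getElem?_eq_none (by omega)] at hj
      simp at hj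
    omega
  by_cases hbig : (t.length : Int) < k
  · -- counter past the end: find gives -1, and no position can be ≥ k
    have hA : PySem.Chars.findFrom t [c] k = -1 := pvFindFrom_big t [c] k hk hbig
    have hB : ¬ r < ps.length := by
      intro hr
      have := hge r hr (le_refl _)
      have := (helt ps[r] (List.getElem_mem hr)).2
      omega
    exact ⟨by simp [hA, hB], fun hr => absurd hr hB⟩
  · rw [not_lt] at hbig
    obtain ⟨kn, rfl⟩ : ∃ kn : Nat, k = (kn : Int) := ⟨k.toNat, by omega⟩
    have hkn : kn ≤ t.length := by exact_mod_cast hbig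
    -- existence of an occurrence at/after kn
    have hexiff : (∃ x ∈ ps, (kn : Int) ≤ x) ↔ [c] <:+: t.drop kn := by
      constructor
      · rintro ⟨x, hx, hkx⟩
        rcases pvMem_pos0.1 hx with ⟨j, rfl, hj⟩
        rw [← PySem.Chars.isIn_iff_infix, ← PySem.Chars.exists_prefix_drop_iff_isIn]
        refine ⟨j - kn, ?_⟩
        rw [pvSingle_prefix, List.drop_drop, List.head?_drop]
        rw [show kn + (j - kn) = j by omega]
        exact hj
      · intro hinf
        rcases (PySem.Chars.exists_prefix_drop_iff_isIn [c] (t.drop kn)).2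
          ((PySem.Chars.isIn_iff_infix [c] (t.drop kn)).2 hinf) with ⟨j, hj⟩
        rw [pvSingle_prefix, List.drop_drop, List.head?_drop] at hj
        exact ⟨(kn + j : Nat), pvMem_pos0.2 ⟨kn + j, by push_cast; ring, hj⟩, by omega⟩
    have hexr : (∃ x ∈ ps, (kn : Int) ≤ x) ↔ r < ps.length := by
      constructor
      · rintro ⟨x, hx, hkx⟩
        rcases List.mem_iff_getElem.1 hx with ⟨j, hjlen, rfl⟩
        by_contra hnr
        have : j < r := by omega
        have := hlt j hjlen this
        omega
      · intro hr
        exact ⟨ps[r], List.getElem_mem hr, hge r hr (le_refl _)⟩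
    have hneg := PySem.Chars.findFrom_natCast_eq_neg_one_iff t [c] kn hkn
    constructor
    · rw [hneg, ← hexiff, hexr]
    · intro hr
      have hne : PySem.Chars.findFrom t [c] (kn : Int) ≠ -1 := by
        rw [Ne, hneg, ← hexiff, not_not]; exact hexr.2 hr
      obtain ⟨hvk, hvpre, hvmin⟩ := PySem.Chars.findFrom_natCast_spec t [c] kn hkn hne
      set v := PySem.Chars.findFrom t [c] (kn : Int) with hv
      rw [pvSingle_prefix, List.head?_drop] at hvpre
      have hvmem : v ∈ ps := pvMem_pos0.2 ⟨v.toNat, by omega, hvpre⟩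
      have hgetD : ps.getD r 0 = ps[r] := List.getD_eq_getElem ps 0 hr
      rw [hgetD]
      -- ps[r] facts
      have hrk := hge r hr (le_refl _)
      rcases pvMem_pos0.1 (List.getElem_mem hr) with ⟨j0, hj0eq, hj0⟩
      -- v ≤ ps[r] by minimality of v
      have h1 : v ≤ ps[r] := by
        by_contra hlt'
        rw [not_le] at hlt'
        have : ¬ [c] <+: t.drop j0 := hvmin j0 (by omega) (by omega)
        rw [pvSingle_prefix, List.head?_drop] at this
        exact this hj0
      -- ps[r] ≤ v since v ∈ ps and v ≥ kn
      have h2 : ps[r] ≤ v := by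
        rcases List.mem_iff_getElem.1 hvmem with ⟨jv, hjvlen, hjveq⟩
        have hrjv : r ≤ jv := by
          by_contra hc'
          have := hlt jv hjvlen (by omega)
          omega
        rcases eq_or_lt_of_le hrjv with rfl | hlt2
        · omega
        · have := List.pairwise_iff_getElem.1 hs r jv hr hjvlen hlt2
          omega
      omega

theorem pvDictEmpty_getD (c : Char) : (PySem.Dict.empty : PySem.Dict Char (List Int)).getD c [] = [] := by
  simp [pysem]

theorem pvLoop (t : List Char) (pos : PySem.Dict Char (List Int))
    (hpos : ∀ c, pos.getD c [] = pvPosFrom t c 0) :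
    ∀ (msg : List Char) (dec out : List String) (ds : List Char) (k : Int), 0 ≤ k →
    ds = (out.map (fun s => s.toList ++ [','])).flatten →
    (msg.foldl (fun (st : List String × List Char × Int) ltrs =>
        if PySem.Chars.findFrom t [ltrs] st.2.2 ≠ -1 then
          (st.1 ++ [PySem.Int.toStr (PySem.Chars.findFrom t [ltrs] st.2.2)],
           st.2.1 ++ PySem.Int.toChars (PySem.Chars.findFrom t [ltrs] st.2.2) ++ [','],
           st.2.2 + 1)
        else (st.1, st.2.1, 0))
      (dec, ds, k)).2.1
    = (((msg.foldl (fun (st : List String × Int) c =>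
        let ps := pos.getD c []
        let lo := pvBsLoop ps st.2 ps.length 0 ps.length
        if lo < ps.length then (st.1 ++ [PySem.Int.toStr (ps.getD lo 0)], st.2 + 1)
        else (st.1, 0)) (out, k)).1).map (fun s => s.toList ++ [','])).flatten := by
  intro msg
  induction msg with
  | nil => intro dec out ds k hk hds; simpa using hds
  | cons c ms ih =>
    intro dec out ds k hk hds
    simp only [List.foldl_cons, hpos c]
    obtain ⟨hiff, hval⟩ := pvStep_eq t c k hk
    by_cases hfound : pvBsLoop (pvPosFrom t c 0) k (pvPosFrom t c 0).length 0 (pvPosFrom t c 0).length < (pvPosFrom t c 0).length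
    · have hAne : PySem.Chars.findFrom t [c] k ≠ -1 := fun h => (hiff.1 h) hfound
      rw [if_pos hAne, if_pos hfound]
      rw [ih _ (out ++ [PySem.Int.toStr ((pvPosFrom t c 0).getD (pvBsLoop (pvPosFrom t c 0) k (pvPosFrom t c 0).length 0 (pvPosFrom t c 0).length) 0)]) _ (k + 1) (by omega) ?_]
      rw [hds, hval hfound]
      simp [PySem.Int.toList_toStr]
    · have hAeq : ¬ PySem.Chars.findFrom t [c] k ≠ -1 := fun h => h (hiff.2 hfound)
      rw [if_neg hAeq, if_neg hfound]
      exact ih _ _ _ 0 (by omega) hds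

theorem pvSlice_dropLast (ds : List Char) :
    PySem.List.slice ds (some 0) (some ((ds.length : Int) - 1)) = ds.dropLast := by
  rw [PySem.List.slice_zero_start]
  cases ds with
  | nil => norm_num [PySem.List.slice_to_neg_one]
  | cons a l =>
    have h := PySem.List.slice_to (a :: l) (b := ((a :: l).length : Int) - 1)
      (by simp only [List.length_cons]; push_cast; omega)
    exact h.trans (by rw [List.dropLast_eq_take]; congr 1; simp only [List.length_cons]; omega)

theorem pvMain (theText theMsg : String) :
    (let st := theMsg.toList.foldl
      (fun (st : List String × List Char × Int) ltrs =>
        if PySem.Chars.findFrom theText.toList [ltrs] st.2.2 ≠ -1 then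
          (st.1 ++ [PySem.Int.toStr (PySem.Chars.findFrom theText.toList [ltrs] st.2.2)],
           st.2.1 ++ PySem.Int.toChars (PySem.Chars.findFrom theText.toList [ltrs] st.2.2) ++ [','],
           st.2.2 + 1)
        else (st.1, st.2.1, 0))
      ([], [], 0)
     String.ofList (PySem.List.slice st.2.1 (some 0) (some ((st.2.1.length : Int) - 1)))) =
    (let pos := (PySem.List.enumerate theText.toList 0).foldl
      (fun (d : PySem.Dict Char (List Int)) p => d.insert p.2 (d.getD p.2 [] ++ [p.1]))
      PySem.Dict.empty
     let st := theMsg.toList.foldl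
      (fun (st : List String × Int) c =>
        let ps := pos.getD c []
        let lo := pvBsLoop ps st.2 ps.length 0 ps.length
        if lo < ps.length then (st.1 ++ [PySem.Int.toStr (ps.getD lo 0)], st.2 + 1)
        else (st.1, 0)) ([], 0)
     PySem.Str.join "," st.1) := by
  set t := theText.toList
  set pos := (PySem.List.enumerate t 0).foldl
      (fun (d : PySem.Dict Char (List Int)) p => d.insert p.2 (d.getD p.2 [] ++ [p.1]))
      PySem.Dict.empty with hposdef
  have hpos : ∀ c, pos.getD c [] = pvPosFrom t c 0 := by
    intro c
    rw [hposdef, pvDict_getD t c 0 PySem.Dict.empty, pvDictEmpty_getD]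
    simp
  have hds := pvLoop t pos hpos theMsg.toList [] [] [] 0 (by omega) (by simp)
  simp only []
  rw [hds]
  rw [pvSlice_dropLast]
  set out := (theMsg.toList.foldl (fun (st : List String × Int) c =>
        let ps := pos.getD c []
        let lo := pvBsLoop ps st.2 ps.length 0 ps.length
        if lo < ps.length then (st.1 ++ [PySem.Int.toStr (ps.getD lo 0)], st.2 + 1)
        else (st.1, 0)) ([], 0)).1 with houtdef
  have : (out.map fun s => s.toList ++ [',']) = (out.map String.toList).map (fun l => l ++ [',']) := by
    simp
  rw [this, pvDropLast_flatten]
  simp only [PySem.Str.join, PySem.Chars.join]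
  rw [show ",".toList = [','] from rfl]

-- ===== VERDICT (by name: the statement is the Claim_ definition above) =====
theorem GrabTheDigits_spec : Claim_equal_GrabTheDigits := by
  intro theText theMsg _
  unfold Spec_GrabTheDigits GrabTheDigits GrabTheDigits_alt
  exact pvMain theText theMsg
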